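-- pv_equiv track=rewrite | github.com/vassiliylakhonin/grantflow | grantflow/swarm/nodes/mel_specialist.py | _dedupe_toc_result_statements
-- ===== SOURCE A (Python) =====
-- def _dedupe_toc_result_statements(items: list[tuple[str, str, int]]) -> list[tuple[str, str, int]]:
--     seen: set[tuple[str, str]] = set()
--     out: list[tuple[str, str, int]] = []
--     for path, statement, priority in sorted(
--         items,
--         key=lambda row: (-int(row[2]), len(str(row[0])), str(row[0])),
--     ):
--         key = (str(path).strip().lower(), str(statement).strip().lower())
--         if key in seen:
--             continue
--         seen.add(key)
--         out.append((path, statement, priority))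
--     return out
-- ===== SOURCE B (Python) =====
-- def _dedupe_toc_result_statements(items: list[tuple[str, str, int]]) -> list[tuple[str, str, int]]:
--     # One pass: index best representative per normalized key, then a single sort of the survivors.
--     best: dict[tuple[str, str], tuple[tuple[int, int, str, int], tuple[str, str, int]]] = {}
--     for idx, (path, statement, priority) in enumerate(items):
--         key = (path.strip().lower(), statement.strip().lower())
--         sk = (-priority, len(path), path, idx)
--         cur = best.get(key)
--         if cur is None or sk < cur[0]:
--             best[key] = (sk, (path, statement, priority))
--     return [row for _, row in sorted(best.values(), key=lambda e: e[0])]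
-- ===== Notes on version B (the rewrite author's own statement) =====
-- stated objective: alternative
-- what changed: A sorts the whole list by the composite key and then filters first occurrences per normalized key; B makes one pass building a dict from normalized key to the best (minimal sort-key, position-extended) representative with strict-< replacement, then sorts only the surviving representatives.
import Mathlib
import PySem

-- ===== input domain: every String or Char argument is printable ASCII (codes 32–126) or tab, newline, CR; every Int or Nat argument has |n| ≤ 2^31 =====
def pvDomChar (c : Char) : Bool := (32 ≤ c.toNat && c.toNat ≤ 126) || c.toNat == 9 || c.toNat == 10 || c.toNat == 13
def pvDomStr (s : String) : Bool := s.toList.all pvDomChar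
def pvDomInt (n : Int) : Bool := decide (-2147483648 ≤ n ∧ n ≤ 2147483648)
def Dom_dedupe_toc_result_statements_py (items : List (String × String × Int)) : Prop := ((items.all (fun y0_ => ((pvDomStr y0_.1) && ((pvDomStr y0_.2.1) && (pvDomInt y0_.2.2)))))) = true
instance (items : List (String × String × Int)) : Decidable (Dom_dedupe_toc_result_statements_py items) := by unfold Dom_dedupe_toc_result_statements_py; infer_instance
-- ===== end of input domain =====

-- B replaces A's sort-all-then-filter-first by a one-pass index (best representative per
-- normalized key, strict-< replacement on the composite sort key extended with the position)
-- followed by one sort of the surviving representatives only.  Same return value everywhere.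

abbrev PvRow := String × String × Int
abbrev PvNKey := String × String
-- Python's 3-tuple sort key (-priority, len(path), path), encoded as nested Lex pairs
-- (lexicographic tuple order, exactly Python's tuple '<').
abbrev PvK3 := Lex (Int × Lex (Int × String))
-- B's flat 4-tuple key (-priority, len(path), path, idx), same nested-Lex encoding.
abbrev PvK4 := Lex (Int × Lex (Int × Lex (String × Nat)))

-- the normalized key (path.strip().lower(), statement.strip().lower()) both programs compute
def pvNorm (r : PvRow) : PvNKey :=
  (PySem.Str.lower (PySem.Str.strip r.1), PySem.Str.lower (PySem.Str.strip r.2.1))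

-- ===== PORT A =====
def pvKeyA (r : PvRow) : PvK3 := toLex (-r.2.2, toLex (PySem.Str.len r.1, r.1))

def dedupe_toc_result_statements_py (items : List (String × String × Int)) : List (String × String × Int) :=
  ((PySem.List.sorted items pvKeyA).foldl
    (fun (st : PySem.Set PvNKey × List PvRow) row =>
      let key := pvNorm row
      if PySem.Set.contains st.1 key then st
      else (PySem.Set.add st.1 key, st.2 ++ [row]))
    (PySem.Set.empty, [])).2

-- ===== PORT B =====
def pvSortKey (r : PvRow) (idx : Nat) : PvK4 :=
  toLex (-r.2.2, toLex (PySem.Str.len r.1, toLex (r.1, idx)))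

-- the 'for idx, (...) in enumerate(items)' loop of Source B, index carried explicitly
def pvGo : List PvRow → Nat → PySem.Dict PvNKey (PvK4 × PvRow) → PySem.Dict PvNKey (PvK4 × PvRow)
  | [], _, best => best
  | r :: t, idx, best =>
    let key := pvNorm r
    let sk := pvSortKey r idx
    match best.get? key with
    | none => pvGo t (idx + 1) (best.insert key (sk, r))
    | some cur => if sk < cur.1 then pvGo t (idx + 1) (best.insert key (sk, r)) else pvGo t (idx + 1) best

def dedupe_toc_result_statements_py_alt (items : List (String × String × Int)) : List (String × String × Int) :=
  (PySem.List.sorted (pvGo items 0 PySem.Dict.empty).values (fun e => e.1)).map (fun e => e.2)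

-- ===== PRECONDITION & SPEC =====
def Spec_dedupe_toc_result_statements_py (items : List (String × String × Int)) (out : List (String × String × Int)) : Prop := out = dedupe_toc_result_statements_py_alt items
instance (items : List (String × String × Int)) (out : List (String × String × Int)) : Decidable (Spec_dedupe_toc_result_statements_py items out) := by unfold Spec_dedupe_toc_result_statements_py; infer_instance

-- ===== CLAIM (what is proved, stated in full; the proofs are below) =====
def Claim_equal_dedupe_toc_result_statements_py : Prop := ∀ (items : List (String × String × Int)), Dom_dedupe_toc_result_statements_py items → Spec_dedupe_toc_result_statements_py items (dedupe_toc_result_statements_py items)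

-- ===== LEMMAS AND PROOFS =====

-- indexed pairs (my own enumerate, used only in proofs)
def pvEnum (n : Nat) : List PvRow → List (Nat × PvRow)
  | [] => []
  | r :: t => (n, r) :: pvEnum (n + 1) t

def pvG (p : Nat × PvRow) : PvK4 := pvSortKey p.2 p.1

lemma pvEnum_le_fst {l : List PvRow} : ∀ {n p}, p ∈ pvEnum n l → n ≤ p.1 := by
  induction l with
  | nil => intro n p h; simp [pvEnum] at h
  | cons r t ih =>
    intro n p h
    simp only [pvEnum, List.mem_cons] at h
    rcases h with h | h
    · simp [h]
    · exact Nat.le_of_succ_le (ih h)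

lemma pvEnum_pairwise (l : List PvRow) : ∀ n, (pvEnum n l).Pairwise (fun a b => a.1 < b.1) := by
  induction l with
  | nil => intro n; simp [pvEnum]
  | cons r t ih =>
    intro n
    refine List.Pairwise.cons ?_ (ih (n + 1))
    intro p hp
    exact lt_of_lt_of_le (Nat.lt_succ_self n) (pvEnum_le_fst hp)

lemma pvEnum_inj_fst {l : List PvRow} {n : Nat} {p q : Nat × PvRow}
    (hp : p ∈ pvEnum n l) (hq : q ∈ pvEnum n l) (h : p.1 = q.1) : p = q := by
  induction l generalizing n with
  | nil => simp [pvEnum] at hp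
  | cons r t ih =>
    simp only [pvEnum, List.mem_cons] at hp hq
    rcases hp with hp | hp <;> rcases hq with hq | hq
    · rw [hp, hq]
    · exfalso; subst hp; have := pvEnum_le_fst hq; omega
    · exfalso; subst hq; have := pvEnum_le_fst hp; omega
    · exact ih hp hq

-- lexicographic unfolding of the 4-component key
lemma pvKey_lt_iff (r r' : PvRow) (i i' : Nat) :
    pvSortKey r i < pvSortKey r' i' ↔ (pvKeyA r < pvKeyA r' ∨ (pvKeyA r = pvKeyA r' ∧ i < i')) := by
  simp only [pvSortKey, pvKeyA, Prod.Lex.toLex_lt_toLex, toLex_inj, Prod.mk.injEq]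
  tauto

lemma pvKey_eq_idx {r r' : PvRow} {i i' : Nat} (h : pvSortKey r i = pvSortKey r' i') : i = i' := by
  simp only [pvSortKey, toLex_inj, Prod.mk.injEq] at h
  exact h.2.2.2

-- insertBy commutes with map snd when the comparison only looks at snd
lemma pvInsertBy_map (x : Nat × PvRow) (acc : List (Nat × PvRow))
    (hb : ∀ y ∈ acc, (fun a b => decide (pvG a < pvG b)) x y
        = (fun a b => decide (pvKeyA a < pvKeyA b)) x.2 y.2) :
    (PySem.List.insertBy (fun a b => decide (pvG a < pvG b)) x acc).map Prod.snd
      = PySem.List.insertBy (fun a b => decide (pvKeyA a < pvKeyA b)) x.2 (acc.map Prod.snd) := by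
  induction acc with
  | nil => simp [PySem.List.insertBy]
  | cons y t ih =>
    have hy : decide (pvG x < pvG y) = decide (pvKeyA x.2 < pvKeyA y.2) := hb y (by simp)
    simp only [PySem.List.insertBy, List.map_cons]
    by_cases hc : (decide (pvG x < pvG y) : Bool) = true
    · simp [hc, hy ▸ hc]
    · simp only [Bool.not_eq_true] at hc
      have hc' : decide (pvKeyA x.2 < pvKeyA y.2) = false := hy ▸ hc
      simp [hc, hc', ih (fun z hz => hb z (by simp [hz]))]

-- the indexed sorted list
def pvSE (items : List PvRow) : List (Nat × PvRow) := PySem.List.sorted (pvEnum 0 items) pvG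

-- stability of Python's sort: sorting by the 3-key equals sorting the indexed list by the 4-key
lemma pvStable (items : List PvRow) :
    PySem.List.sorted items pvKeyA = (pvSE items).map Prod.snd := by
  have S1 : ∀ (l : List PvRow) (n : Nat) (acc : List (Nat × PvRow)),
      (∀ p ∈ acc, p.1 < n) →
      l.foldl (fun a x => PySem.List.insertBy (fun a b => decide (pvKeyA a < pvKeyA b)) x a)
          (acc.map Prod.snd)
        = ((pvEnum n l).foldl
            (fun a x => PySem.List.insertBy (fun a b => decide (pvG a < pvG b)) x a) acc).map
            Prod.snd := by
    intro l
    induction l with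
    | nil => intro n acc _; rfl
    | cons r t ih =>
      intro n acc h
      simp only [List.foldl_cons, pvEnum]
      rw [← pvInsertBy_map (n, r) acc ?_]
      · refine ih (n + 1) _ ?_
        intro p hp
        rcases (PySem.List.mem_insertBy _ _ _ _).1 hp with h1 | h1
        · subst h1; exact Nat.lt_succ_self n
        · exact Nat.lt_succ_of_lt (h p h1)
      · intro y hy
        refine decide_eq_decide.mpr ?_
        have hy' := h y hy
        rw [show pvG (n, r) = pvSortKey r n from rfl, show pvG y = pvSortKey y.2 y.1 from rfl,
          pvKey_lt_iff]
        constructor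
        · rintro (h1 | ⟨_, h2⟩)
          · exact h1
          · omega
        · exact fun h1 => Or.inl h1
  have h0 := S1 items 0 [] (by simp)
  simp only [List.map_nil] at h0
  rw [PySem.List.sorted_eq_foldl_insertBy items pvKeyA, h0, pvSE,
    PySem.List.sorted_eq_foldl_insertBy (pvEnum 0 items) pvG]

lemma pvSE_pairwise_lt (items : List PvRow) :
    (pvSE items).Pairwise (fun a b => pvG a < pvG b) := by
  have hperm : (pvSE items).Perm (pvEnum 0 items) := PySem.List.sorted_perm _ _ _
  have hndE : (pvEnum 0 items).Nodup :=
    (pvEnum_pairwise items 0).imp (fun h => by intro heq; rw [heq] at h; exact lt_irrefl _ h)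
  have hndSE : (pvSE items).Nodup := hperm.nodup_iff.mpr hndE
  refine ((PySem.List.sorted_pairwise (pvEnum 0 items) pvG).and hndSE).imp_of_mem ?_
  intro a b ha hb ⟨hle, hne⟩
  refine lt_of_le_of_ne hle ?_
  intro heq
  apply hne
  exact pvEnum_inj_fst (hperm.mem_iff.mp ha) (hperm.mem_iff.mp hb) (pvKey_eq_idx heq)

-- A's dedupe loop, recursively
def pvDedupe (seen : PySem.Set PvNKey) : List PvRow → List PvRow
  | [] => []
  | r :: t =>
    if PySem.Set.contains seen (pvNorm r) then pvDedupe seen t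
    else r :: pvDedupe (PySem.Set.add seen (pvNorm r)) t

lemma pvFold_eq_dedupe (l : List PvRow) : ∀ (seen : PySem.Set PvNKey) (out : List PvRow),
    (l.foldl
      (fun (st : PySem.Set PvNKey × List PvRow) row =>
        let key := pvNorm row
        if PySem.Set.contains st.1 key then st
        else (PySem.Set.add st.1 key, st.2 ++ [row]))
      (seen, out)).2 = out ++ pvDedupe seen l := by
  induction l with
  | nil => intro seen out; simp [pvDedupe]
  | cons r t ih =>
    intro seen out
    have iht := ih
    simp [PySem.Set.contains] at iht
    by_cases hm : pvNorm r ∈ seen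
    · simp [PySem.Set.contains, pvDedupe, hm, iht]
    · simp [PySem.Set.contains, pvDedupe, hm, iht]

-- first-occurrence-per-key on the indexed list
def pvFirst (seen : PySem.Set PvNKey) : List (Nat × PvRow) → List (Nat × PvRow)
  | [] => []
  | p :: t =>
    if PySem.Set.contains seen (pvNorm p.2) then pvFirst seen t
    else p :: pvFirst (PySem.Set.add seen (pvNorm p.2)) t

lemma pvDedupe_map (l : List (Nat × PvRow)) : ∀ seen,
    pvDedupe seen (l.map Prod.snd) = (pvFirst seen l).map Prod.snd := by
  induction l with
  | nil => intro seen; rfl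
  | cons p t ih =>
    intro seen
    simp only [List.map_cons, pvDedupe, pvFirst]
    by_cases hm : pvNorm p.2 ∈ seen
    · simp [hm, ih]
    · simp [hm, ih]

lemma pvFirst_sublist (seen : PySem.Set PvNKey) (l : List (Nat × PvRow)) :
    (pvFirst seen l).Sublist l := by
  induction l generalizing seen with
  | nil => simp [pvFirst]
  | cons p t ih =>
    simp only [pvFirst]
    split_ifs
    · exact (ih seen).cons p
    · exact (ih _).cons₂ p

-- membership in pvFirst on a strictly sorted list: exactly the minima of each key group
lemma pvFirst_mem (l : List (Nat × PvRow)) (hpw : l.Pairwise (fun a b => pvG a < pvG b)) :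
    ∀ (seen : PySem.Set PvNKey) (x : Nat × PvRow),
    x ∈ pvFirst seen l ↔
      (x ∈ l ∧ pvNorm x.2 ∉ seen ∧ ∀ q ∈ l, pvNorm q.2 = pvNorm x.2 → pvG x ≤ pvG q) := by
  induction l with
  | nil => intro seen x; simp [pvFirst]
  | cons p t ih =>
    intro seen x
    rcases List.pairwise_cons.1 hpw with ⟨hp, hpt⟩
    by_cases hm : pvNorm p.2 ∈ seen
    · rw [pvFirst, if_pos (by simpa [PySem.Set.contains] using hm), ih hpt seen x]
      constructor
      · rintro ⟨hxt, hxs, hall⟩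
        refine ⟨List.mem_cons_of_mem _ hxt, hxs, ?_⟩
        intro q hq hkq
        rcases List.mem_cons.1 hq with rfl | hq
        · exact absurd (hkq ▸ hm) hxs
        · exact hall q hq hkq
      · rintro ⟨hx, hxs, hall⟩
        rcases List.mem_cons.1 hx with rfl | hxt
        · exact absurd hm hxs
        · exact ⟨hxt, hxs, fun q hq hkq => hall q (List.mem_cons_of_mem _ hq) hkq⟩
    · rw [pvFirst, if_neg (by simpa [PySem.Set.contains] using hm)]
      simp only [List.mem_cons]
      constructor
      · rintro (rfl | hxf)
        · refine ⟨Or.inl rfl, hm, ?_⟩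
          intro q hq hkq
          rcases hq with rfl | hq
          · exact le_refl _
          · exact le_of_lt (hp q hq)
        · rcases (ih hpt _ x).1 hxf with ⟨hxt, hxs, hall⟩
          rw [PySem.Set.mem_add] at hxs
          push Not at hxs
          refine ⟨Or.inr hxt, hxs.1, ?_⟩
          intro q hq hkq
          rcases hq with rfl | hq
          · exact absurd hkq.symm hxs.2
          · exact hall q hq hkq
      · rintro ⟨hx, hxs, hall⟩
        rcases hx with rfl | hxt
        · exact Or.inl rfl
        · refine Or.inr ((ih hpt _ x).2 ⟨hxt, ?_, fun q hq hkq => hall q (Or.inr hq) hkq⟩)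
          rw [PySem.Set.mem_add]
          push Not
          refine ⟨hxs, ?_⟩
          intro heq
          have h1 := hall p (Or.inl rfl) heq.symm
          exact absurd h1 (not_le.mpr (hp x hxt))

-- dict invariant
def pvInv (processed : List (Nat × PvRow)) (L : List (PvNKey × (PvK4 × PvRow))) : Prop :=
  (L.map Prod.fst).Nodup ∧
  (∀ e ∈ L, ∃ p ∈ processed, e.1 = pvNorm p.2 ∧ e.2 = (pvG p, p.2) ∧
      ∀ q ∈ processed, pvNorm q.2 = e.1 → pvG p ≤ pvG q) ∧
  (∀ p ∈ processed, pvNorm p.2 ∈ L.map Prod.fst)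

-- raw association-list facts about PySem.Dict (keys compared with a lawful BEq)
lemma pvDict_get?_eq_none {κ ν : Type} [BEq κ] [LawfulBEq κ] (d : PySem.Dict κ ν) (k : κ) :
    d.get? k = none ↔ k ∉ d.items.map Prod.fst := by
  simp only [PySem.Dict.get?, Option.map_eq_none_iff, List.find?_eq_none, beq_iff_eq,
    List.mem_map]
  constructor
  · intro h hk
    obtain ⟨p, hp, hpk⟩ := hk
    exact h p hp hpk
  · intro h p hp hpk
    exact h ⟨p, hp, hpk⟩

lemma pvDict_get?_mem {κ ν : Type} [BEq κ] [LawfulBEq κ] {d : PySem.Dict κ ν} {k : κ} {v : ν}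
    (h : d.get? k = some v) : (k, v) ∈ d.items := by
  simp only [PySem.Dict.get?, Option.map_eq_some_iff] at h
  obtain ⟨p, hfind, rfl⟩ := h
  have hk : p.1 = k := by
    have := List.find?_some hfind
    simpa using this
  have := List.mem_of_find?_eq_some hfind
  rwa [show (k, p.2) = p by rw [← hk]]

lemma pv_nodup_fst_eq {κ ν : Type} {L : List (κ × ν)} (hnd : (L.map Prod.fst).Nodup)
    {k : κ} {v w : ν} (h1 : (k, v) ∈ L) (h2 : (k, w) ∈ L) : v = w := by
  induction L with
  | nil => simp at h1
  | cons e t ih =>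
    simp only [List.map_cons, List.nodup_cons] at hnd
    rcases List.mem_cons.1 h1 with h1' | h1' <;> rcases List.mem_cons.1 h2 with h2' | h2'
    · exact (Prod.ext_iff.1 (h1'.trans h2'.symm)).2
    · exfalso; apply hnd.1
      rw [show e.1 = k from (congrArg Prod.fst h1').symm]
      exact List.mem_map_of_mem (f := Prod.fst) h2'
    · exfalso; apply hnd.1
      rw [show e.1 = k from (congrArg Prod.fst h2').symm]
      exact List.mem_map_of_mem (f := Prod.fst) h1'
    · exact ih hnd.2 h1' h2'

lemma pvDict_insert_not_mem {κ ν : Type} [BEq κ] [LawfulBEq κ] (d : PySem.Dict κ ν) {k : κ} (v : ν)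
    (h : k ∉ d.items.map Prod.fst) : (d.insert k v).items = d.items ++ [(k, v)] := by
  have hc : d.contains k = false := by
    simp only [PySem.Dict.contains, List.any_eq_false]
    intro p hp heq
    exact h (by rw [← eq_of_beq heq]; exact List.mem_map_of_mem (f := Prod.fst) hp)
  unfold PySem.Dict.insert
  rw [hc]
  rfl

lemma pvDict_insert_mem {κ ν : Type} [BEq κ] [LawfulBEq κ] (d : PySem.Dict κ ν) {k : κ} (v : ν)
    (h : k ∈ d.items.map Prod.fst) :
    (d.insert k v).items = d.items.map (fun p => if p.1 == k then (k, v) else p) := by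
  have hc : d.contains k = true := by
    simp only [PySem.Dict.contains, List.any_eq_true]
    obtain ⟨p, hp, heq⟩ := List.mem_map.1 h
    exact ⟨p, hp, by simp [heq]⟩
  unfold PySem.Dict.insert
  rw [hc]
  simp

lemma pvMin_unique {items : List PvRow} {p q : Nat × PvRow} (hp : p ∈ pvEnum 0 items)
    (hq : q ∈ pvEnum 0 items) (h1 : pvG p ≤ pvG q) (h2 : pvG q ≤ pvG p) : p = q :=
  pvEnum_inj_fst hp hq (pvKey_eq_idx (le_antisymm h1 h2))

set_option maxHeartbeats 1000000 in
lemma pvGo_inv (t : List PvRow) : ∀ (idx : Nat) (d : PySem.Dict PvNKey (PvK4 × PvRow))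
    (processed : List (Nat × PvRow)),
    pvInv processed d.items → (∀ p ∈ processed, p.1 < idx) →
    pvInv (processed ++ pvEnum idx t) (pvGo t idx d).items := by
  induction t with
  | nil =>
    intro idx d processed hInv _
    simpa [pvGo, pvEnum] using hInv
  | cons r t ih =>
    intro idx d processed hInv hb
    unfold pvInv at hInv
    obtain ⟨hnd, hent, hcov⟩ := hInv
    have hassoc : processed ++ pvEnum idx (r :: t) = (processed ++ [(idx, r)]) ++ pvEnum (idx + 1) t := by
      simp [pvEnum]
    rw [hassoc]
    have hb' : ∀ p ∈ processed ++ [(idx, r)], p.1 < idx + 1 := by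
      intro p hp
      rcases List.mem_append.1 hp with hp | hp
      · exact Nat.lt_succ_of_lt (hb p hp)
      · simp only [List.mem_singleton] at hp; subst hp; exact Nat.lt_succ_self idx
    rcases hg : d.get? (pvNorm r) with _ | cur
    · -- key not present yet: entry appended
      have hk : pvNorm r ∉ d.items.map Prod.fst := (pvDict_get?_eq_none d _).1 hg
      simp only [pvGo, hg]
      apply ih _ _ _ _ hb'
      unfold pvInv
      rw [pvDict_insert_not_mem d _ hk]
      refine ⟨?_, ?_, ?_⟩
      · simp only [List.map_append, List.map_cons, List.map_nil]
        rw [List.nodup_append]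
        refine ⟨hnd, List.nodup_singleton _, ?_⟩
        intro a ha b hb2
        simp only [List.mem_cons, List.not_mem_nil, or_false] at hb2
        subst hb2
        intro heq
        exact hk (heq ▸ ha)
      · intro e he
        rcases List.mem_append.1 he with he | he
        · obtain ⟨p, hpmem, h1, h2, hmin⟩ := hent e he
          refine ⟨p, List.mem_append_left _ hpmem, h1, h2, ?_⟩
          intro q hq hkq
          rcases List.mem_append.1 hq with hq | hq
          · exact hmin q hq hkq
          · simp only [List.mem_singleton] at hq; subst hq
            exfalso
            apply hk
            have hkq' : pvNorm r = e.1 := hkq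
            rw [hkq']
            exact List.mem_map_of_mem (f := Prod.fst) he
        · simp only [List.mem_singleton] at he; subst he
          refine ⟨(idx, r), List.mem_append_right _ (by simp), rfl, rfl, ?_⟩
          intro q hq hkq
          rcases List.mem_append.1 hq with hq | hq
          · exfalso
            apply hk
            have hkq' : pvNorm q.2 = pvNorm r := hkq
            rw [← hkq']
            exact hcov q hq
          · simp only [List.mem_singleton] at hq; subst hq; exact le_refl _
      · intro p hp
        simp only [List.map_append, List.map_cons, List.map_nil, List.mem_append]
        rcases List.mem_append.1 hp with hp | hp
        · exact Or.inl (hcov p hp)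
        · simp only [List.mem_singleton] at hp; subst hp
          exact Or.inr (by simp)
    · -- key present
      have hcurmem : (pvNorm r, cur) ∈ d.items := pvDict_get?_mem hg
      have hkmem : pvNorm r ∈ d.items.map Prod.fst := List.mem_map.2 ⟨_, hcurmem, rfl⟩
      have hkeys : ((d.insert (pvNorm r) (pvSortKey r idx, r)).items).map Prod.fst = d.items.map Prod.fst := by
        rw [pvDict_insert_mem d _ hkmem, List.map_map]
        apply List.map_congr_left
        intro p _
        by_cases hbe : (p.1 == pvNorm r) = true
        · simp [Function.comp, eq_of_beq hbe]
        · simp [Function.comp, hbe]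
      by_cases hlt : pvSortKey r idx < cur.1
      · simp only [pvGo, hg, if_pos hlt]
        apply ih _ _ _ _ hb'
        unfold pvInv
        refine ⟨by rw [hkeys]; exact hnd, ?_, ?_⟩
        · intro e' he'
          rw [pvDict_insert_mem d _ hkmem] at he'
          obtain ⟨e, heL, rfl⟩ := List.mem_map.1 he'
          by_cases hbe : (e.1 == pvNorm r) = true
          · simp only [hbe, if_true]
            refine ⟨(idx, r), List.mem_append_right _ (by simp), rfl, rfl, ?_⟩
            intro q hq hkq
            rcases List.mem_append.1 hq with hq | hq
            · obtain ⟨pe, hpe, he1, he2, hemin⟩ := hent e heL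
              have hecur : e.2 = cur := by
                apply pv_nodup_fst_eq hnd _ hcurmem
                rw [← eq_of_beq hbe]
                exact heL
              have hcur1 : cur.1 = pvG pe := by rw [← hecur, he2]
              have h3 : pvG pe ≤ pvG q := hemin q hq (hkq.trans (eq_of_beq hbe).symm)
              calc pvG (idx, r) = pvSortKey r idx := rfl
                _ ≤ pvG q := le_of_lt (lt_of_lt_of_le hlt (hcur1 ▸ h3))
            · simp only [List.mem_singleton] at hq; subst hq; exact le_refl _
          · rw [Bool.not_eq_true] at hbe
            simp only [hbe, Bool.false_eq_true, if_false]
            obtain ⟨pe, hpe, he1, he2, hemin⟩ := hent e heL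
            refine ⟨pe, List.mem_append_left _ hpe, he1, he2, ?_⟩
            intro q hq hkq
            rcases List.mem_append.1 hq with hq | hq
            · exact hemin q hq hkq
            · simp only [List.mem_singleton] at hq; subst hq
              exact absurd hkq.symm (ne_of_beq_false hbe)
        · intro p hp
          rw [hkeys]
          rcases List.mem_append.1 hp with hp | hp
          · exact hcov p hp
          · simp only [List.mem_singleton] at hp; subst hp; exact hkmem
      · simp only [pvGo, hg, if_neg hlt]
        apply ih _ _ _ _ hb'
        unfold pvInv
        refine ⟨hnd, ?_, ?_⟩
        · intro e he
          obtain ⟨pe, hpe, he1, he2, hemin⟩ := hent e he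
          refine ⟨pe, List.mem_append_left _ hpe, he1, he2, ?_⟩
          intro q hq hkq
          rcases List.mem_append.1 hq with hq | hq
          · exact hemin q hq hkq
          · simp only [List.mem_singleton] at hq; subst hq
            have hkq' : pvNorm r = e.1 := hkq
            have hm2 : (pvNorm r, e.2) ∈ d.items := by
              rw [hkq', Prod.mk.eta]
              exact he
            have hecur : e.2 = cur := pv_nodup_fst_eq hnd hm2 hcurmem
            have hcur1 : cur.1 = pvG pe := by rw [← hecur, he2]
            calc pvG pe = cur.1 := hcur1.symm
              _ ≤ pvSortKey r idx := not_lt.1 hlt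
              _ = pvG (idx, r) := rfl
        · intro p hp
          rcases List.mem_append.1 hp with hp | hp
          · exact hcov p hp
          · simp only [List.mem_singleton] at hp; subst hp; exact hkmem

theorem pv_main (items : List PvRow) :
    dedupe_toc_result_statements_py items = dedupe_toc_result_statements_py_alt items := by
  have hInv : pvInv (pvEnum 0 items) (pvGo items 0 PySem.Dict.empty).items := by
    have h0 := pvGo_inv items 0 PySem.Dict.empty []
      (by unfold pvInv; refine ⟨?_, ?_, ?_⟩ <;> simp [PySem.Dict.empty]) (by simp)
    simpa using h0
  unfold pvInv at hInv
  obtain ⟨hnd, hent, hcov⟩ := hInv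
  have hVmem : ∀ e, e ∈ PySem.Dict.values (pvGo items 0 PySem.Dict.empty) ↔
      ∃ p, p ∈ pvEnum 0 items ∧
        (∀ q ∈ pvEnum 0 items, pvNorm q.2 = pvNorm p.2 → pvG p ≤ pvG q) ∧ e = (pvG p, p.2) := by
    intro e
    simp only [PySem.Dict.values, List.mem_map]
    constructor
    · rintro ⟨en, henL, rfl⟩
      obtain ⟨p, hp, h1, h2, hmin⟩ := hent en henL
      exact ⟨p, hp, fun q hq hkq => hmin q hq (hkq.trans h1.symm), h2⟩
    · rintro ⟨p, hp, hmin, rfl⟩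
      obtain ⟨en, henL, h1⟩ := List.mem_map.1 (hcov p hp)
      obtain ⟨p', hp', h1', h2', hmin'⟩ := hent en henL
      have hpp : p' = p :=
        pvMin_unique hp' hp (hmin' p hp h1.symm) (hmin p' hp' (h1'.symm.trans h1))
      exact ⟨en, henL, by rw [h2', hpp]⟩
  have hSEperm : (pvSE items).Perm (pvEnum 0 items) := PySem.List.sorted_perm _ _ _
  have hSEpw := pvSE_pairwise_lt items
  have hFSmem : ∀ x, x ∈ pvFirst PySem.Set.empty (pvSE items) ↔
      x ∈ pvEnum 0 items ∧ ∀ q ∈ pvEnum 0 items, pvNorm q.2 = pvNorm x.2 → pvG x ≤ pvG q := by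
    intro x
    rw [pvFirst_mem _ hSEpw PySem.Set.empty x]
    constructor
    · rintro ⟨h1, _, h3⟩
      exact ⟨hSEperm.mem_iff.1 h1, fun q hq => h3 q (hSEperm.mem_iff.2 hq)⟩
    · rintro ⟨h1, h3⟩
      exact ⟨hSEperm.mem_iff.2 h1, by simp [PySem.Set.empty], fun q hq => h3 q (hSEperm.mem_iff.1 hq)⟩
  have hFSpw : (pvFirst PySem.Set.empty (pvSE items)).Pairwise (fun a b => pvG a < pvG b) :=
    List.Pairwise.sublist (pvFirst_sublist _ _) hSEpw
  have hys : PySem.List.sorted (PySem.Dict.values (pvGo items 0 PySem.Dict.empty)) (fun e => e.1)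
      = (pvFirst PySem.Set.empty (pvSE items)).map (fun p => (pvG p, p.2)) := by
    apply PySem.List.sorted_eq_of_perm_of_pairwise_lt
    · have hndys : ((pvFirst PySem.Set.empty (pvSE items)).map (fun p => (pvG p, p.2))).Nodup := by
        have h1 : (pvFirst PySem.Set.empty (pvSE items)).Pairwise
            (fun a b => (pvG a, a.2) ≠ (pvG b, b.2)) :=
          hFSpw.imp (fun h => by intro heq; exact absurd (congrArg Prod.fst heq) (ne_of_lt h))
        exact List.Pairwise.map _ (fun a b h => h) h1
      have hLpwfst : (pvGo items 0 PySem.Dict.empty).items.Pairwise (fun a b => a.1 ≠ b.1) :=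
        List.pairwise_map.1 hnd
      have hndV : (PySem.Dict.values (pvGo items 0 PySem.Dict.empty)).Nodup := by
        have h2 : (pvGo items 0 PySem.Dict.empty).items.Pairwise (fun a b => a.2 ≠ b.2) := by
          refine hLpwfst.imp_of_mem ?_
          intro a b ha hb hne heq
          obtain ⟨pa, hpa, ha1, ha2, _⟩ := hent a ha
          obtain ⟨pb, hpb, hb1, hb2, _⟩ := hent b hb
          have hg : pvG pa = pvG pb := by
            rw [ha2, hb2] at heq
            exact congrArg Prod.fst heq
          have : pa = pb := pvMin_unique hpa hpb (le_of_eq hg) (le_of_eq hg.symm)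
          exact hne (by rw [ha1, hb1, this])
        exact List.Pairwise.map _ (fun a b h => h) h2
      rw [List.perm_ext_iff_of_nodup hndys hndV]
      intro e
      rw [hVmem e, List.mem_map]
      constructor
      · rintro ⟨x, hxFS, rfl⟩
        obtain ⟨h1, h3⟩ := (hFSmem x).1 hxFS
        exact ⟨x, h1, h3, rfl⟩
      · rintro ⟨p, hp, hmin, rfl⟩
        exact ⟨p, (hFSmem p).2 ⟨hp, hmin⟩, rfl⟩
    · rw [List.pairwise_map]
      simpa using hFSpw
  have hA : dedupe_toc_result_statements_py items
      = (pvFirst PySem.Set.empty (pvSE items)).map Prod.snd := by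
    unfold dedupe_toc_result_statements_py
    rw [pvStable items, pvFold_eq_dedupe, pvDedupe_map]
    simp
  rw [hA]
  unfold dedupe_toc_result_statements_py_alt
  rw [hys, List.map_map]
  apply List.map_congr_left
  intro a _
  rfl

-- ===== VERDICT (by name: the statement is the Claim_ definition above) =====
theorem dedupe_toc_result_statements_py_spec : Claim_equal_dedupe_toc_result_statements_py := by
  intro items _
  unfold Spec_dedupe_toc_result_statements_py
  exact pv_main items
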